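-- pv_equiv track=rewrite | github.com/jwsoh07/GIC-Cinema-Booking-System | cinema-booking-system.py | count_available_seats
-- ===== SOURCE A (Python) =====
-- def count_available_seats(seating, start_row, start_seat):
--     count = 0
--     rows = list(seating.keys())
--     start_index = rows.index(start_row)
--
--     for i in range(start_index, len(rows)):
--         row = rows[i]
--         if i == start_index:
--             count += seating[row][start_seat:].count('.')
--         else:
--             count += seating[row].count('.')
--
--     return count
-- ===== SOURCE B (Python) =====
-- def count_available_seats(seating, start_row, start_seat):
--     # Complement counting: total '.' in the whole map minus the '.' skipped
--     # before the start position, found in one pass with an early return.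
--     total = sum(seats.count('.') for seats in seating.values())
--     skipped = 0
--     for row, seats in seating.items():
--         if row == start_row:
--             return total - skipped - seats[:start_seat].count('.')
--         skipped += seats.count('.')
--     raise ValueError(f"'{start_row}' is not in list")
-- ===== Notes on version B (the rewrite author's own statement) =====
-- stated objective: alternative
-- what changed: Replaces A's index-based suffix summation (rows list, rows.index, range loop with a first-row branch) by complement counting: one global total of '.' over all values, then a single pass over items() that accumulates the skipped prefix and early-returns total - skipped - dots-before-start_seat in the start row.
import Mathlib
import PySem

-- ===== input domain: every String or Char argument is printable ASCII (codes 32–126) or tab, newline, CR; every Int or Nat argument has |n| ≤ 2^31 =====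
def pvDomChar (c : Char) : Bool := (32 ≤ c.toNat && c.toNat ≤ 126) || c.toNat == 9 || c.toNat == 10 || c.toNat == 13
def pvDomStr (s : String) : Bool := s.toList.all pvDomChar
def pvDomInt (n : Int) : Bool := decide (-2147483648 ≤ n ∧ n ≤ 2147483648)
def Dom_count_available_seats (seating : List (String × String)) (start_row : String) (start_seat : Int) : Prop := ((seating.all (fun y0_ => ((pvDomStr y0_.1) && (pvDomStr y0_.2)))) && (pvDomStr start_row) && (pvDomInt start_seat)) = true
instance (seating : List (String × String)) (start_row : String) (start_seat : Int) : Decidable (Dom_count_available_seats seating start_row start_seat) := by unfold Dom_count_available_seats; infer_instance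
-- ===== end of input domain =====

-- B replaces A's index-based suffix summation by complement counting: a global total of '.'
-- over all rows, then one pass over items accumulating the skipped prefix and early-returning
-- total - skipped - dots-before-start_seat; same cost, a different decomposition.


-- ===== PORT A =====
-- literal transliteration of A: rows = list(seating.keys()); start_index = rows.index(start_row);
-- then a loop over range(start_index, len(rows)) accumulating per-row '.'-counts,
-- slicing the first row at start_seat.  (rows.index raises ValueError when start_row is
-- absent: that case is the 'none' branch, excluded by Pre_.)
def count_available_seats (seating : List (String × String)) (start_row : String) (start_seat : Int) : Int :=
  let d := PySem.Dict.ofList seating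
  let rows := d.keys
  match PySem.List.index? rows start_row with
  | none => 0
  | some start_index =>
    (PySem.List.pyRange (start_index : Int) (PySem.List.len rows)).foldl
      (fun count i =>
        let row := PySem.List.pyGetD rows i ""
        if i = (start_index : Int) then
          count + (PySem.Str.count (PySem.Str.slice (d.getD row "") (some start_seat) none) "." : Int)
        else
          count + (PySem.Str.count (d.getD row "") "." : Int)) 0

-- ===== PORT B =====
-- the early-returning for-loop of Source B: walk the items, accumulate the skipped '.'-count,
-- and on the start row return total - skipped - dots before start_seat.  The [] case is
-- Source B's 'raise ValueError' (start_row absent), excluded by Pre_.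
def pvScanB (items : List (String × String)) (start_row : String) (start_seat : Int)
    (total skipped : Int) : Int :=
  match items with
  | [] => 0
  | (row, seats) :: rest =>
    if row = start_row then
      total - skipped - (PySem.Str.count (PySem.Str.slice seats none (some start_seat)) "." : Int)
    else
      pvScanB rest start_row start_seat total (skipped + (PySem.Str.count seats "." : Int))

-- literal transliteration of B (Source B): total = sum of '.' over seating.values(), then the
-- single pass above starting with skipped = 0.
def count_available_seats_alt (seating : List (String × String)) (start_row : String) (start_seat : Int) : Int :=
  let d := PySem.Dict.ofList seating
  let total : Int := (d.values.map (fun seats => (PySem.Str.count seats "." : Int))).sum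
  pvScanB d.items start_row start_seat total 0

-- ===== PRECONDITION & SPEC =====
-- Pre_ excludes exactly the inputs where both Pythons raise ValueError (start_row is not a
-- key of seating); both return normally everywhere else.
def Pre_count_available_seats (seating : List (String × String)) (start_row : String) (start_seat : Int) : Prop :=
  start_row ∈ (PySem.Dict.ofList seating).keys
instance (seating : List (String × String)) (start_row : String) (start_seat : Int) : Decidable (Pre_count_available_seats seating start_row start_seat) := by unfold Pre_count_available_seats; infer_instance
def pvWitness_count_available_seats : (List (String × String)) × String × Int :=
  ([("A", "..x."), ("B", "....")], "A", 1)

def Spec_count_available_seats (seating : List (String × String)) (start_row : String) (start_seat : Int) (out : Int) : Prop := out = count_available_seats_alt seating start_row start_seat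
instance (seating : List (String × String)) (start_row : String) (start_seat : Int) (out : Int) : Decidable (Spec_count_available_seats seating start_row start_seat out) := by unfold Spec_count_available_seats; infer_instance

-- ===== CLAIM (what is proved, stated in full; the proofs are below) =====
def Claim_equal_count_available_seats : Prop := ∀ (seating : List (String × String)) (start_row : String) (start_seat : Int), Dom_count_available_seats seating start_row start_seat → Pre_count_available_seats seating start_row start_seat → Spec_count_available_seats seating start_row start_seat (count_available_seats seating start_row start_seat)

-- ===== LEMMAS AND PROOFS =====

-- counting the one-character substring [c] is counting the character c
theorem count_go_single (c : Char) : ∀ (l : List Char) (fuel acc : Nat), l.length ≤ fuel →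
    PySem.Chars.count.go [c] fuel l acc = acc + l.count c
  | [], fuel, acc, _ => by cases fuel <;> simp [PySem.Chars.count.go]
  | h :: t, fuel + 1, acc, hf => by
    have ht : t.length ≤ fuel := by simpa using hf
    have hrec1 := count_go_single c t fuel (acc + 1) ht
    have hrec2 := count_go_single c t fuel acc ht
    by_cases hc : h = c
    · simp [PySem.Chars.count.go, List.isPrefixOf, hc, hrec1]
      omega
    · simp [PySem.Chars.count.go, List.isPrefixOf, hc, hrec2, Ne.symm hc]

theorem count_single (l : List Char) (c : Char) : PySem.Chars.count l [c] = l.count c := by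
  simpa [PySem.Chars.count] using count_go_single c l l.length 0 le_rfl

theorem str_count_dot (s : String) : PySem.Str.count s "." = s.toList.count '.' := by
  have hdot : ".".toList = ['.'] := by decide
  rw [PySem.Str.count_eq, hdot, count_single]

theorem pyGetD_eq_getElem {α : Type} (xs : List α) (d : α) (n : Nat) (h : n < xs.length) :
    PySem.List.pyGetD xs (n : Int) d = xs[n] := by
  simp [PySem.List.pyGetD_natCast, List.getD_eq_getElem?_getD, h]

-- shorthand for the per-row '.'-count
def cnt (s : String) : Int := PySem.Str.count s "."

-- the two halves of a Python slice split the '.'-count:  s.count = s[:k].count + s[k:].count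
theorem cnt_split (s : String) (k : Int) :
    cnt s =
      (PySem.Str.count (PySem.Str.slice s none (some k)) "." : Int) +
      (PySem.Str.count (PySem.Str.slice s (some k) none) "." : Int) := by
  unfold cnt
  rw [str_count_dot, str_count_dot, str_count_dot,
      PySem.Str.toList_slice, PySem.Str.toList_slice]
  simp only [PySem.Chars.slice_eq_listSlice]
  rcases le_or_gt 0 k with hk | hk
  · rw [PySem.List.slice_to _ hk, PySem.List.slice_from _ hk, ← Nat.cast_add,
        ← List.count_append, List.take_append_drop]
  · obtain ⟨m, hm, rfl⟩ : ∃ m : Nat, 0 < m ∧ k = -(m : Int) :=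
      ⟨(-k).toNat, by omega, by omega⟩
    rw [PySem.List.slice_to_neg_natCast _ _ hm, PySem.List.slice_from_neg_natCast _ _ hm,
        ← Nat.cast_add, ← List.count_append, List.take_append_drop]

-- the common normal form both ports are reduced to: suffix sum starting at the FIRST
-- occurrence of start_row, the first row sliced from start_seat
def specGo (start_row : String) (start_seat : Int) : List (String × String) → Int
  | [] => 0
  | (row, seats) :: rest =>
    if row = start_row then
      (PySem.Str.count (PySem.Str.slice seats (some start_seat) none) "." : Int) +
        (rest.map (fun p => cnt p.2)).sum
    else specGo start_row start_seat rest

-- B's scan computes total - (dots not at/after the start position)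
theorem pvScanB_eq (start_row : String) (start_seat : Int) :
    ∀ (L : List (String × String)) (total skipped : Int),
      start_row ∈ L.map Prod.fst →
      pvScanB L start_row start_seat total skipped =
        total - skipped - (L.map (fun p => cnt p.2)).sum + specGo start_row start_seat L
  | [], _, _, h => by simp at h
  | (row, seats) :: rest, total, skipped, h => by
    by_cases hr : row = start_row
    · subst hr
      have hsplit := cnt_split seats start_seat
      simp only [pvScanB, specGo, List.map_cons, List.sum_cons, if_pos trivial]
      unfold cnt at hsplit ⊢
      omega
    · have hmem : start_row ∈ rest.map Prod.fst := by
        simpa [hr, Ne.symm hr] using h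
      have ih := pvScanB_eq start_row start_seat rest total
        (skipped + (PySem.Str.count seats "." : Int)) hmem
      simp only [pvScanB, specGo, if_neg hr, List.map_cons, List.sum_cons, ih]
      unfold cnt
      ring

-- specGo on keys paired with their lookups equals the indexed suffix sum A computes
theorem specGo_map (start_row : String) (start_seat : Int) (g : String → String) :
    ∀ (rows : List String) (si : Nat),
      PySem.List.index? rows start_row = some si →
      specGo start_row start_seat (rows.map (fun k => (k, g k))) =
        (PySem.Str.count (PySem.Str.slice (g start_row) (some start_seat) none) "." : Int) +
          ((rows.drop (si + 1)).map (fun r => cnt (g r))).sum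
  | [], _, h => by simp [PySem.List.index?] at h
  | r :: rest, si, h => by
    by_cases hr : r = start_row
    · subst hr
      have hsi0 : si = 0 := by
        simp [PySem.List.index?, List.idxOf?_cons] at h
        omega
      subst hsi0
      simp [specGo, List.map_map, Function.comp_def]
    · simp only [PySem.List.index?, List.idxOf?_cons, beq_iff_eq, if_neg hr] at h
      obtain ⟨si', hsi', rfl⟩ := Option.map_eq_some_iff.mp h
      have ih := specGo_map start_row start_seat g rest si'
        (by simpa [PySem.List.index?] using hsi')
      simp [specGo, hr, ih]

-- ===== VERDICT (by name: the statement is the Claim_ definition above) =====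
theorem count_available_seats_spec : Claim_equal_count_available_seats := by
  intro seating start_row start_seat _hdom hpre
  unfold Spec_count_available_seats count_available_seats count_available_seats_alt
  simp only []
  set d := PySem.Dict.ofList seating with hd
  set rows := d.keys with hrowsdef
  have hnd : rows.Nodup := PySem.Dict.nodup_keys_ofList seating
  have hmem : start_row ∈ rows := hpre
  obtain ⟨si, hsi⟩ := Option.isSome_iff_exists.mp
    ((PySem.List.index?_isSome_iff rows start_row).mpr hmem)
  simp only [hsi]
  obtain ⟨hlt, hget, -⟩ := PySem.List.getElem_of_index?_eq_some hsi
  have hlen : PySem.List.len rows = (rows.length : Int) := rfl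
  have hltI : (si : Int) < (rows.length : Int) := by exact_mod_cast hlt
  set cS : Int := (PySem.Str.count (PySem.Str.slice (d.getD start_row "") (some start_seat) none) "." : Int) with hcS
  -- A side: peel the first iteration, then turn the tail of the range into a suffix sum
  rw [hlen, PySem.List.pyRange_one_cons hltI]
  simp only [List.foldl_cons]
  rw [pyGetD_eq_getElem rows "" si hlt, hget]
  rw [PySem.List.foldl_congr_mem (PySem.List.pyRange ((si:Int)+1) (rows.length:Int))
      _ (fun count i => count + (PySem.Str.count (d.getD (PySem.List.pyGetD rows i "") "") "." : Int)) _
      (by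
        intro acc x hx
        have hx' := (PySem.List.mem_pyRange_iff_of_pos (a := (si:Int)+1)
          (b := (rows.length:Int)) (s := 1) one_pos x).mp hx
        have : x ≠ (si : Int) := by omega
        simp [this])]
  have hfold := PySem.List.foldl_pyRange_pyGetD rows ""
      (fun (acc : Int) (row : String) => acc + (PySem.Str.count (d.getD row "") "." : Int))
      (0 + cS) (a := (si:Int)+1) (by positivity)
  beta_reduce at hfold
  rw [hlen] at hfold
  rw [if_pos trivial, hfold]
  have htoNat : ((si : Int) + 1).toNat = si + 1 := by omega
  rw [htoNat, PySem.List.foldl_add]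
  -- B side: the scan lemma, then identify totals and reduce to the same suffix sum
  have hitems : d.items = rows.map (fun k => (k, d.getD k "")) :=
    PySem.Dict.items_eq_map_keys d hnd ""
  have hvalues : d.values = rows.map (fun k => d.getD k "") :=
    PySem.Dict.values_eq_map_keys d hnd ""
  have hmemItems : start_row ∈ d.items.map Prod.fst := by
    rw [hitems]
    simpa [List.map_map, Function.comp_def] using hmem
  rw [pvScanB_eq start_row start_seat d.items _ 0 hmemItems]
  rw [hitems, specGo_map start_row start_seat (fun k => d.getD k "") rows si hsi]
  rw [hvalues]
  simp only [List.map_map, Function.comp_def]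
  unfold cnt
  ring
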